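-- pv_equiv track=rewrite | github.com/kalpan000/saharanpurcode | dashboard/test2.py | getProperResponse
-- ===== SOURCE A (Python) =====
-- def getProperResponse(data):
-- 	output = {"nodes": [], "links": []}
--
-- 	for dc in data:
--
-- 		output["nodes"].append({"id": dc, "name": dc, "type": "datacenter"})
--
-- 		output["nodes"].append({"id" : dc + "network" , "name" : dc + "network" , "type" : "networktype"})
-- 		output["nodes"].append({"id" : dc + "server" , "name" : dc + "server" , "type" : "servertype"})
--
-- 		output["links"].append({"source" : dc + "network" , "target" : dc , "type" : "networktype"})
-- 		output["links"].append({"source" : dc + "server" , "target" : dc , "type" : "servertype"})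
--
--
--
-- 		for type in data[dc]:
-- 			for ip in data[dc][type]:
--
-- 				output["nodes"].append({"id" : ip , "name" : ip , "type" : type.lower()})
--
-- 				if type == "network":
-- 					output["links"].append({"source" : dc + "network" , "target" : ip , "type" : type.lower()})
-- 				else:
-- 					output["links"].append({"source" : dc + "server" , "target" : ip , "type" : type.lower()})
--
--
-- 	lastDC = None
-- 	for node in output["nodes"]:
--
-- 		if node["type"] == "datacenter":
-- 			if lastDC != None:
-- 				output["links"].append({"source" : node["id"] , "target" : lastDC["id"] , "type" : "datacenter"})
-- 			lastDC = node
--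
-- 	if lastDC != None:
-- 		output["links"].append({"source" : lastDC["id"] , "target" : output["nodes"][0]["id"] , "type" : "datacenter"})
--
-- 	return output
-- ===== SOURCE B (Python) =====
-- def _dcNodes(dc, inner):
-- 	return ([{"id": dc, "name": dc, "type": "datacenter"},
-- 	         {"id": dc + "network", "name": dc + "network", "type": "networktype"},
-- 	         {"id": dc + "server", "name": dc + "server", "type": "servertype"}]
-- 	        + [{"id": ip, "name": ip, "type": t.lower()}
-- 	           for t in inner for ip in inner[t]])
--
--
-- def _dcLinks(dc, inner):
-- 	return ([{"source": dc + "network", "target": dc, "type": "networktype"},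
-- 	         {"source": dc + "server", "target": dc, "type": "servertype"}]
-- 	        + [{"source": dc + ("network" if t == "network" else "server"),
-- 	            "target": ip, "type": t.lower()}
-- 	           for t in inner for ip in inner[t]])
--
--
-- def getProperResponse(data):
-- 	dcs = list(data)
-- 	nodes = [n for dc in dcs for n in _dcNodes(dc, data[dc])]
-- 	links = [l for dc in dcs for l in _dcLinks(dc, data[dc])]
-- 	if dcs:
-- 		links += [{"source": b, "target": a, "type": "datacenter"}
-- 		          for a, b in zip(dcs, dcs[1:])]
-- 		links.append({"source": dcs[-1], "target": dcs[0], "type": "datacenter"})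
-- 	return {"nodes": nodes, "links": links}
-- ===== Notes on version B (the rewrite author's own statement) =====
-- stated objective: idiomatic
-- what changed: B builds nodes and links declaratively by concatenating per-datacenter comprehensions from two small helpers, and emits the ring links directly from the dict's key list, instead of A's imperative append loop followed by a second scan over all emitted nodes with a lastDC accumulator.
-- intended difference: On inputs where some inner category name lowercases to "datacenter" and has a nonempty ip list, A's rescan accidentally threads those ip nodes into the datacenter ring (extra ring links through ip ids); B rings exactly the top-level datacenter keys, which is the intended ring over datacenters. — e.g. on getProperResponse([("a", [("Datacenter", ["x"])])]): A returns [("nodes", [[("id","a"),("name","a"),("type","datacenter")], [("id","anetwork"),("name","anetwork"),("type","networktyp…, B returns [("nodes", [[("id","a"),("name","a"),("type","datacenter")], [("id","anetwork"),("name","anetwork"),("type","networktyp…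
import Mathlib
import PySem

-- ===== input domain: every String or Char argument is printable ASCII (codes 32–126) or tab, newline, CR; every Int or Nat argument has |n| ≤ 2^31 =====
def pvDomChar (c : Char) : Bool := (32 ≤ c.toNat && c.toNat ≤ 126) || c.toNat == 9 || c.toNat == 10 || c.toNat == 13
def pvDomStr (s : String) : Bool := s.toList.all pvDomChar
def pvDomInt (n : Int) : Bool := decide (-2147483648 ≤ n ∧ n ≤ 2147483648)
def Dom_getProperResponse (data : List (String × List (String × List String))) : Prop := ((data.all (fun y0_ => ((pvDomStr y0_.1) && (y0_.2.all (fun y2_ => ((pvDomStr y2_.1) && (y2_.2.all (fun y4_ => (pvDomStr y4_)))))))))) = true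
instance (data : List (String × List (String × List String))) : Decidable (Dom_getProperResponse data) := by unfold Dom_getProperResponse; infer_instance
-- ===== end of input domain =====

-- B builds the nodes/links declaratively by concatenating per-datacenter comprehensions and
-- rings the dict's key list directly, instead of A's imperative appends plus a second scan of
-- all nodes; on inputs where an inner category lowercases to "datacenter" (D_ below) B's ring
-- intentionally skips the ip nodes A's rescan accidentally threads in (objective: idiomatic).

-- ===== PORT A =====
def pvNodeA (i n t : String) : List (String × String) := [("id", i), ("name", n), ("type", t)]
def pvLinkA (s t ty : String) : List (String × String) := [("source", s), ("target", t), ("type", ty)]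

-- innermost loop: for ip in data[dc][type]
def pvIpStepA (dc ty : String) (st : List (List (String × String)) × List (List (String × String)))
    (ip : String) : List (List (String × String)) × List (List (String × String)) :=
  let nodes := st.1 ++ [pvNodeA ip ip (PySem.Str.lower ty)]
  if ty == "network" then
    (nodes, st.2 ++ [pvLinkA (dc ++ "network") ip (PySem.Str.lower ty)])
  else
    (nodes, st.2 ++ [pvLinkA (dc ++ "server") ip (PySem.Str.lower ty)])

-- body of 'for dc in data' (data[dc] / data[dc][type] are dict lookups)
def pvDCStepA (data : List (String × List (String × List String)))
    (st : List (List (String × String)) × List (List (String × String)))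
    (p : String × List (String × List String)) :
    List (List (String × String)) × List (List (String × String)) :=
  let dc := p.1
  let st1 := (st.1 ++ [pvNodeA dc dc "datacenter",
                       pvNodeA (dc ++ "network") (dc ++ "network") "networktype",
                       pvNodeA (dc ++ "server") (dc ++ "server") "servertype"],
              st.2 ++ [pvLinkA (dc ++ "network") dc "networktype",
                       pvLinkA (dc ++ "server") dc "servertype"])
  ((PySem.Dict.mk data).getD dc []).foldl
    (fun st2 q =>
      ((PySem.Dict.mk ((PySem.Dict.mk data).getD dc [])).getD q.1 []).foldl
        (pvIpStepA dc q.1) st2)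
    st1

-- second pass: for node in output["nodes"], with the lastDC accumulator
def pvScanStepA (st : List (List (String × String)) × Option (List (String × String)))
    (node : List (String × String)) :
    List (List (String × String)) × Option (List (String × String)) :=
  if (PySem.Dict.mk node).getD "type" "" == "datacenter" then
    (match st.2 with
     | some last =>
         st.1 ++ [pvLinkA ((PySem.Dict.mk node).getD "id" "") ((PySem.Dict.mk last).getD "id" "") "datacenter"]
     | none => st.1,
     some node)
  else st

def getProperResponse (data : List (String × List (String × List String))) :
    List (String × List (List (String × String))) :=
  let built := data.foldl (pvDCStepA data) ([], [])
  let scan := built.1.foldl pvScanStepA (built.2, none)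
  let links :=
    match scan.2 with
    | some last =>
        scan.1 ++ [pvLinkA ((PySem.Dict.mk last).getD "id" "")
                           ((PySem.Dict.mk ((PySem.List.pyGet? built.1 0).getD [])).getD "id" "") "datacenter"]
    | none => scan.1
  [("nodes", built.1), ("links", links)]

-- ===== PORT B =====
def pvNodeB (i n t : String) : List (String × String) := [("id", i), ("name", n), ("type", t)]
def pvLinkB (s t ty : String) : List (String × String) := [("source", s), ("target", t), ("type", ty)]

-- helper _dcNodes: the node block one datacenter contributes
def pvDcNodesB (dc : String) (inner : List (String × List String)) : List (List (String × String)) :=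
  [pvNodeB dc dc "datacenter",
   pvNodeB (dc ++ "network") (dc ++ "network") "networktype",
   pvNodeB (dc ++ "server") (dc ++ "server") "servertype"] ++
  inner.flatMap (fun q => ((PySem.Dict.mk inner).getD q.1 []).map
    (fun ip => pvNodeB ip ip (PySem.Str.lower q.1)))

-- helper _dcLinks: the link block one datacenter contributes
def pvDcLinksB (dc : String) (inner : List (String × List String)) : List (List (String × String)) :=
  [pvLinkB (dc ++ "network") dc "networktype",
   pvLinkB (dc ++ "server") dc "servertype"] ++
  inner.flatMap (fun q => ((PySem.Dict.mk inner).getD q.1 []).map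
    (fun ip => pvLinkB (dc ++ (if q.1 == "network" then "network" else "server")) ip (PySem.Str.lower q.1)))

def getProperResponse_alt (data : List (String × List (String × List String))) :
    List (String × List (List (String × String))) :=
  let dcs := data.map Prod.fst
  let nodes := dcs.flatMap (fun dc => pvDcNodesB dc ((PySem.Dict.mk data).getD dc []))
  let links0 := dcs.flatMap (fun dc => pvDcLinksB dc ((PySem.Dict.mk data).getD dc []))
  let links :=
    if dcs = [] then links0
    else links0 ++ (dcs.zip dcs.tail).map (fun pr => pvLinkB pr.2 pr.1 "datacenter")
                ++ [pvLinkB (dcs.getLastD "") (dcs.headD "") "datacenter"]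
  [("nodes", nodes), ("links", links)]

-- ===== PRECONDITION & SPEC =====
-- On inputs where some inner category name lowercases to "datacenter" and has a nonempty ip
-- list, A's rescan threads those ip nodes into the datacenter ring (extra ring links through
-- ip ids); B rings exactly the top-level datacenter keys, which is the intended ring.
def D_getProperResponse (data : List (String × List (String × List String))) : Prop :=
  (data.any (fun p => p.2.any (fun q =>
    PySem.Str.lower q.1 == "datacenter" && !q.2.isEmpty))) = true
instance (data : List (String × List (String × List String))) : Decidable (D_getProperResponse data) := by unfold D_getProperResponse; infer_instance

def Spec_getProperResponse (data : List (String × List (String × List String))) (out : List (String × List (List (String × String)))) : Prop := ¬ D_getProperResponse data → out = getProperResponse_alt data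
instance (data : List (String × List (String × List String))) (out : List (String × List (List (String × String)))) : Decidable (Spec_getProperResponse data out) := by unfold Spec_getProperResponse; infer_instance

def pvDiffWitness_getProperResponse : (List (String × List (String × List String))) :=
  [("a", [("Datacenter", ["x"])])]

def pvDiffWitnessOut_getProperResponse :
    (List (String × List (List (String × String)))) × (List (String × List (List (String × String)))) :=
  ([("nodes", [[("id","a"),("name","a"),("type","datacenter")],
               [("id","anetwork"),("name","anetwork"),("type","networktype")],
               [("id","aserver"),("name","aserver"),("type","servertype")],
               [("id","x"),("name","x"),("type","datacenter")]]),
    ("links", [[("source","anetwork"),("target","a"),("type","networktype")],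
               [("source","aserver"),("target","a"),("type","servertype")],
               [("source","aserver"),("target","x"),("type","datacenter")],
               [("source","x"),("target","a"),("type","datacenter")],
               [("source","x"),("target","a"),("type","datacenter")]])],
   [("nodes", [[("id","a"),("name","a"),("type","datacenter")],
               [("id","anetwork"),("name","anetwork"),("type","networktype")],
               [("id","aserver"),("name","aserver"),("type","servertype")],
               [("id","x"),("name","x"),("type","datacenter")]]),
    ("links", [[("source","anetwork"),("target","a"),("type","networktype")],
               [("source","aserver"),("target","a"),("type","servertype")],
               [("source","aserver"),("target","x"),("type","datacenter")],
               [("source","a"),("target","a"),("type","datacenter")]])])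

-- ===== CLAIM (what is proved, stated in full; the proofs are below) =====
def Claim_unchanged_getProperResponse : Prop := ∀ (data : List (String × List (String × List String))), Dom_getProperResponse data → Spec_getProperResponse data (getProperResponse data)
def Claim_changed_getProperResponse : Prop := Dom_getProperResponse (pvDiffWitness_getProperResponse) ∧ D_getProperResponse (pvDiffWitness_getProperResponse) ∧ getProperResponse (pvDiffWitness_getProperResponse) = pvDiffWitnessOut_getProperResponse.1 ∧ getProperResponse_alt (pvDiffWitness_getProperResponse) = pvDiffWitnessOut_getProperResponse.2 ∧ pvDiffWitnessOut_getProperResponse.1 ≠ pvDiffWitnessOut_getProperResponse.2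

-- ===== LEMMAS AND PROOFS =====

def pvIsDC (node : List (String × String)) : Bool :=
  (PySem.Dict.mk node).getD "type" "" == "datacenter"
theorem pvIsDC_node (i n t : String) : pvIsDC (pvNodeA i n t) = (t == "datacenter") := by
  simp [pvIsDC, pvNodeA, PySem.Dict.getD, PySem.Dict.get?]

theorem pvNodeB_eq : pvNodeB = pvNodeA := rfl
theorem pvLinkB_eq : pvLinkB = pvLinkA := rfl

-- dict lookup yields the default or the value of some entry with the looked-up key
theorem pvGetD_cases {α : Type} (l : List (String × α)) (k : String) (d : α) :
    (PySem.Dict.mk l).getD k d = d ∨ ∃ q ∈ l, q.1 = k ∧ (PySem.Dict.mk l).getD k d = q.2 := by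
  induction l with
  | nil => left; rfl
  | cons p rest ih =>
      obtain ⟨k1, v1⟩ := p
      by_cases h : k1 == k
      · right
        refine ⟨(k1, v1), by simp, by simpa using h, ?_⟩
        simp [PySem.Dict.getD, PySem.Dict.get?_mk_cons, h]
      · have hrw : (PySem.Dict.mk ((k1, v1) :: rest)).getD k d = (PySem.Dict.mk rest).getD k d := by
          simp [PySem.Dict.getD, PySem.Dict.get?_mk_cons, h]
        rcases ih with h0 | ⟨q, hq, hk, hv⟩
        · left; rw [hrw, h0]
        · right; exact ⟨q, by simp [hq], hk, by rw [hrw, hv]⟩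

-- A's innermost ip loop equals B's map comprehension on both components
theorem pvIp_flat (dc ty : String) (ips : List String)
    (st : List (List (String × String)) × List (List (String × String))) :
    ips.foldl (pvIpStepA dc ty) st
      = (st.1 ++ ips.map (fun ip => pvNodeA ip ip (PySem.Str.lower ty)),
         st.2 ++ ips.map (fun ip =>
           pvLinkA (dc ++ (if ty == "network" then "network" else "server")) ip (PySem.Str.lower ty))) := by
  induction ips generalizing st with
  | nil => simp
  | cons ip ips ih =>
      have hstep : pvIpStepA dc ty st ip
          = (st.1 ++ [pvNodeA ip ip (PySem.Str.lower ty)],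
             st.2 ++ [pvLinkA (dc ++ (if ty == "network" then "network" else "server")) ip (PySem.Str.lower ty)]) := by
        simp only [pvIpStepA]
        split_ifs with h <;> simp
      simp only [List.foldl_cons, hstep, ih, List.map_cons]
      simp

-- A's middle loop equals B's flatMap comprehension on both components
theorem pvTy_flat (dc : String) (inner : List (String × List String))
    (tys : List (String × List String))
    (st : List (List (String × String)) × List (List (String × String))) :
    tys.foldl
      (fun st2 q => ((PySem.Dict.mk inner).getD q.1 []).foldl (pvIpStepA dc q.1) st2) st
      = (st.1 ++ tys.flatMap (fun q => ((PySem.Dict.mk inner).getD q.1 []).map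
            (fun ip => pvNodeA ip ip (PySem.Str.lower q.1))),
         st.2 ++ tys.flatMap (fun q => ((PySem.Dict.mk inner).getD q.1 []).map
            (fun ip => pvLinkA (dc ++ (if q.1 == "network" then "network" else "server")) ip (PySem.Str.lower q.1)))) := by
  induction tys generalizing st with
  | nil => simp
  | cons q tys ih =>
      rw [List.foldl_cons, pvIp_flat, ih]
      simp

-- one iteration of A's outer loop appends exactly B's two helper blocks
theorem pvDCStepA_eq (data : List (String × List (String × List String)))
    (st : List (List (String × String)) × List (List (String × String)))
    (p : String × List (String × List String)) :
    pvDCStepA data st p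
      = (st.1 ++ pvDcNodesB p.1 ((PySem.Dict.mk data).getD p.1 []),
         st.2 ++ pvDcLinksB p.1 ((PySem.Dict.mk data).getD p.1 [])) := by
  simp only [pvDCStepA]
  rw [pvTy_flat]
  simp [pvDcNodesB, pvDcLinksB, pvNodeB_eq, pvLinkB_eq]

-- A's whole build loop equals B's two flatMap comprehensions
theorem pvBuild_flat (data rest : List (String × List (String × List String)))
    (st : List (List (String × String)) × List (List (String × String))) :
    rest.foldl (pvDCStepA data) st
      = (st.1 ++ rest.flatMap (fun p => pvDcNodesB p.1 ((PySem.Dict.mk data).getD p.1 [])),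
         st.2 ++ rest.flatMap (fun p => pvDcLinksB p.1 ((PySem.Dict.mk data).getD p.1 []))) := by
  induction rest generalizing st with
  | nil => simp
  | cons p ps ih =>
      rw [List.foldl_cons, pvDCStepA_eq, ih]
      simp

-- under ¬D_, the datacenter-typed nodes of one block are exactly the dc node itself
theorem pvFilter_block (dc : String) (inner : List (String × List String))
    (h : ∀ q ∈ inner, PySem.Str.lower q.1 = "datacenter" → q.2 = []) :
    (pvDcNodesB dc inner).filter pvIsDC = [pvNodeA dc dc "datacenter"] := by
  have hflat : (inner.flatMap (fun q => ((PySem.Dict.mk inner).getD q.1 []).map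
      (fun ip => pvNodeB ip ip (PySem.Str.lower q.1)))).filter pvIsDC = [] := by
    rw [List.filter_flatMap]
    apply List.flatMap_eq_nil_iff.mpr
    intro q hq
    by_cases hdc : PySem.Str.lower q.1 = "datacenter"
    · have hips : (PySem.Dict.mk inner).getD q.1 [] = ([] : List String) := by
        rcases pvGetD_cases inner q.1 ([] : List String) with h0 | ⟨q', hq', hk, hv⟩
        · exact h0
        · rw [hv]; exact h q' hq' (by rw [hk, hdc])
      rw [hips]; rfl
    · rw [List.filter_map]
      have hcomp : pvIsDC ∘ (fun ip => pvNodeB ip ip (PySem.Str.lower q.1)) = fun _ => false := by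
        funext ip
        simp only [Function.comp, pvNodeB_eq, pvIsDC_node]
        exact beq_eq_false_iff_ne.mpr hdc
      rw [hcomp]; simp
  simp only [pvDcNodesB, List.filter_append, hflat, List.append_nil]
  rw [pvNodeB_eq]
  have h1 : pvIsDC (pvNodeA dc dc "datacenter") = true := by rw [pvIsDC_node]; rfl
  have h2 : pvIsDC (pvNodeA (dc ++ "network") (dc ++ "network") "networktype") = false := by
    rw [pvIsDC_node]; rfl
  have h3 : pvIsDC (pvNodeA (dc ++ "server") (dc ++ "server") "servertype") = false := by
    rw [pvIsDC_node]; rfl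
  simp [h1, h2, h3]

-- A's second pass skips non-datacenter nodes, so it folds over the filter
theorem pvScan_filter (nodes : List (List (String × String)))
    (st : List (List (String × String)) × Option (List (String × String))) :
    nodes.foldl pvScanStepA st = (nodes.filter pvIsDC).foldl pvScanStepA st := by
  induction nodes generalizing st with
  | nil => rfl
  | cons x xs ih =>
      by_cases hx : pvIsDC x
      · simp only [List.foldl_cons, List.filter_cons, hx, ih, if_pos trivial]
      · have hid : pvScanStepA st x = st := by
          simp only [pvScanStepA]
          rw [if_neg (by simpa [pvIsDC] using hx)]
        simp only [List.foldl_cons, List.filter_cons, hid, ih]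
        simp [hx]

-- raw field reads of a node literal
theorem pvRawId (i n t : String) : (PySem.Dict.mk (pvNodeA i n t)).getD "id" "" = i := by
  simp [pvNodeA, PySem.Dict.getD, PySem.Dict.get?]
theorem pvRawType (i n t : String) : (PySem.Dict.mk (pvNodeA i n t)).getD "type" "" = t := by
  simp [pvNodeA, PySem.Dict.getD, PySem.Dict.get?]

-- a comprehension producing singletons is a map
theorem pvFlatMap_single {α β : Type} (l : List α) (f : α → β) :
    l.flatMap (fun x => [f x]) = l.map f := by
  induction l with
  | nil => rfl
  | cons a t ih => simp [ih]

-- chain characterisation of the second pass over the datacenter nodes of the key list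
theorem pvScan_chain (K : List String) (L : List (List (String × String))) (a : String) :
    (K.map (fun i => pvNodeA i i "datacenter")).foldl pvScanStepA
        (L, some (pvNodeA a a "datacenter"))
      = (L ++ (List.zip (a :: K) K).map (fun pr => pvLinkA pr.2 pr.1 "datacenter"),
         some (pvNodeA (K.getLastD a) (K.getLastD a) "datacenter")) := by
  induction K generalizing L a with
  | nil => simp
  | cons b K ih =>
      have hstep : pvScanStepA (L, some (pvNodeA a a "datacenter")) (pvNodeA b b "datacenter")
          = (L ++ [pvLinkA b a "datacenter"], some (pvNodeA b b "datacenter")) := by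
        simp only [pvScanStepA, pvRawType, pvRawId]
        rw [if_pos (by decide)]
      simp only [List.map_cons, List.foldl_cons, hstep, ih, List.zip_cons_cons,
        List.getLastD_cons]
      simp

-- last datacenter key seen by A's scan = last element of B's key list
theorem pvLastD_fst (p : String × List (String × List String))
    (ps : List (String × List (String × List String))) :
    (ps.getLast?.getD p).1 = ((p.1 :: ps.map Prod.fst).getLast?.getD "") := by
  induction ps generalizing p with
  | nil => rfl
  | cons q t ih =>
      rw [List.getLast?_cons, Option.getD_some, ih q]
      simp [List.getLast?_cons]

-- ¬D_ transferred through the outer dict lookup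
theorem pvNoDC_inner (data : List (String × List (String × List String)))
    (hD : ¬ D_getProperResponse data) (dc : String) :
    ∀ q ∈ (PySem.Dict.mk data).getD dc [], PySem.Str.lower q.1 = "datacenter" → q.2 = [] := by
  intro q hq hlow
  rcases pvGetD_cases data dc ([] : List (String × List String)) with h0 | ⟨p, hp, _, hv⟩
  · rw [h0] at hq; simp at hq
  · rw [hv] at hq
    by_contra hne
    exact hD (by
      simp only [D_getProperResponse, List.any_eq_true]
      exact ⟨p, hp, q, hq, by simp [hlow, hne]⟩)

theorem pv_main (data : List (String × List (String × List String)))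
    (hD : ¬ D_getProperResponse data) :
    getProperResponse data = getProperResponse_alt data := by
  cases data with
  | nil => decide
  | cons p ps =>
      simp only [getProperResponse, getProperResponse_alt]
      rw [pvBuild_flat (p :: ps) (p :: ps) ([], [])]
      simp only [List.nil_append]
      set D := p :: ps with hDdef
      have hfilter : (D.flatMap (fun r => pvDcNodesB r.1 ((PySem.Dict.mk D).getD r.1 []))).filter pvIsDC
          = D.map (fun r => pvNodeA r.1 r.1 "datacenter") := by
        rw [List.filter_flatMap]
        have hblocks : ∀ r ∈ D, (pvDcNodesB r.1 ((PySem.Dict.mk D).getD r.1 [])).filter pvIsDC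
            = [pvNodeA r.1 r.1 "datacenter"] :=
          fun r _ => pvFilter_block r.1 _ (pvNoDC_inner D hD r.1)
        rw [List.flatMap_congr hblocks, pvFlatMap_single]
      obtain ⟨rest, hrest⟩ : ∃ rest, D.flatMap (fun r => pvDcNodesB r.1 ((PySem.Dict.mk D).getD r.1 []))
          = pvNodeA p.1 p.1 "datacenter" :: rest := by
        rw [hDdef, List.flatMap_cons]
        exact ⟨_, rfl⟩
      have hmm : ps.map (fun r => pvNodeA r.1 r.1 "datacenter")
          = (ps.map Prod.fst).map (fun i => pvNodeA i i "datacenter") := by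
        rw [List.map_map]
        rfl
      have hfirst : pvScanStepA
          ((D.flatMap (fun r => pvDcLinksB r.1 ((PySem.Dict.mk D).getD r.1 []))), none)
          (pvNodeA p.1 p.1 "datacenter")
          = ((D.flatMap (fun r => pvDcLinksB r.1 ((PySem.Dict.mk D).getD r.1 []))),
             some (pvNodeA p.1 p.1 "datacenter")) := by
        simp only [pvScanStepA, pvRawType]
        rw [if_pos (by decide)]
      rw [pvScan_filter, hfilter, hDdef]
      simp only [List.map_cons, List.foldl_cons]
      rw [← hDdef, hfirst, hmm, pvScan_chain (ps.map Prod.fst) _ p.1]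
      simp only [hrest, PySem.List.pyGet?_zero_cons, Option.getD_some]
      rw [if_neg (List.cons_ne_nil _ _)]
      have hKn : List.flatMap (fun dc => pvDcNodesB dc ((PySem.Dict.mk D).getD dc []))
            (p.1 :: List.map Prod.fst ps)
          = D.flatMap (fun r => pvDcNodesB r.1 ((PySem.Dict.mk D).getD r.1 [])) := by
        rw [hDdef, ← List.map_cons, List.flatMap_map]
      have hKl : List.flatMap (fun dc => pvDcLinksB dc ((PySem.Dict.mk D).getD dc []))
            (p.1 :: List.map Prod.fst ps)
          = D.flatMap (fun r => pvDcLinksB r.1 ((PySem.Dict.mk D).getD r.1 [])) := by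
        rw [hDdef, ← List.map_cons, List.flatMap_map]
      rw [hKn, hKl, hrest]
      simp only [pvRawId, pvLinkB_eq, List.tail_cons, List.headD_cons]
      simp
      rw [pvLastD_fst p ps]

-- ===== VERDICT (by name: the statement is the Claim_ definition above) =====
theorem getProperResponse_spec : Claim_unchanged_getProperResponse := by
  intro data _ hD
  exact pv_main data hD

theorem getProperResponse_changed : Claim_changed_getProperResponse := by
  unfold Claim_changed_getProperResponse; decide
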